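-- pv_equiv track=rewrite | github.com/scawful/Oracle-of-Secrets | scripts/tag_org_hooks.py | _format_hook_comment
-- ===== SOURCE A (Python) =====
-- def _format_hook_comment(kv: dict[str, str]) -> str:
--     if not kv:
--         return "@hook"
--     order = [
--         "module", "name", "kind", "target", "note",
--         "expected_m", "expected_x", "skip_abi", "abi", "abi_class",
--     ]
--     parts = []
--     for key in order:
--         if key in kv:
--             parts.append(f"{key}={_format_value(kv[key])}")
--     for key in sorted(kv.keys()):
--         if key not in order:
--             parts.append(f"{key}={_format_value(kv[key])}")
--     return "@hook " + " ".join(parts)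
--
-- def _format_value(value: str) -> str:
--     value = str(value)
--     if not value:
--         return "\"\""
--     if any(ch.isspace() for ch in value):
--         escaped = value.replace('"', '\\"')
--         return f"\"{escaped}\""
--     return value
-- ===== SOURCE B (Python) =====
-- def _format_value(value: str) -> str:
--     value = str(value)
--     if not value:
--         return "\"\""
--     if any(ch.isspace() for ch in value):
--         escaped = value.replace('"', '\\"')
--         return f"\"{escaped}\""
--     return value
--
--
-- def _format_hook_comment(kv: dict[str, str]) -> str:
--     if not kv:
--         return "@hook"
--     order = [
--         "module", "name", "kind", "target", "note",
--         "expected_m", "expected_x", "skip_abi", "abi", "abi_class",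
--     ]
--     rank = {k: i for i, k in enumerate(order)}
--     keys = sorted(kv, key=lambda k: (rank.get(k, len(order)), k))
--     return "@hook " + " ".join(f"{k}={_format_value(kv[k])}" for k in keys)
-- ===== Notes on version B (the rewrite author's own statement) =====
-- stated objective: simpler
-- what changed: A builds the key sequence with two passes (a scan of the fixed `order` list filtered by membership, then a scan of the alphabetically sorted keys filtered by non-membership in `order`); B builds a rank index over `order` once and obtains the same sequence with a single sorted() call under the composite key (rank.get(k, len(order)), k), then emits the parts in one comprehension.
import Mathlib
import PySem

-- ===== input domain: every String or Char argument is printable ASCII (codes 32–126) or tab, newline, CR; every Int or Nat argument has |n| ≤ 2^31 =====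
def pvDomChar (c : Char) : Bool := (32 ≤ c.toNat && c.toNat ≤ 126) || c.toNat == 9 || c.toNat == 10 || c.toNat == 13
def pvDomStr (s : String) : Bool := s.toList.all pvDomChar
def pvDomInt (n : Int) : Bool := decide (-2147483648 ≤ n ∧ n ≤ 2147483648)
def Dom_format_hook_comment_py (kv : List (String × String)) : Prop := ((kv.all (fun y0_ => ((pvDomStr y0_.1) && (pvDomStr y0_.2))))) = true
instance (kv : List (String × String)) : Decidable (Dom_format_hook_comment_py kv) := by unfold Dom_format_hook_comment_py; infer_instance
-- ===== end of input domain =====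

-- B replaces A's two ordered-then-alphabetical passes over the keys by one sort with a composite (rank, key) key; simpler (shorter), same cost.

-- ===== PORT A =====
-- module constant: the fixed `order` list
def pvOrder : List String :=
  ["module", "name", "kind", "target", "note",
   "expected_m", "expected_x", "skip_abi", "abi", "abi_class"]

-- module helper `_format_value`, shared by both implementations (as in the Python module)
def pvFormatValue (value : String) : String :=
  if value = "" then "\"\""
  else if value.toList.any PySem.Chars.isspace then
    "\"" ++ PySem.Str.replace value "\"" "\\\"" ++ "\""
  else value

def format_hook_comment_py (kv : List (String × String)) : String :=
  let d := PySem.Dict.ofList kv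
  if d.size = 0 then "@hook"
  else
    let parts : List String := pvOrder.foldl (fun parts key =>
      if d.contains key then parts ++ [key ++ "=" ++ pvFormatValue (d.getD key "")] else parts) []
    let parts := (PySem.List.sorted d.keys (fun k => k) false).foldl (fun parts key =>
      if !pvOrder.contains key then parts ++ [key ++ "=" ++ pvFormatValue (d.getD key "")] else parts) parts
    "@hook " ++ PySem.Str.join " " parts

-- ===== PORT B =====
def format_hook_comment_py_alt (kv : List (String × String)) : String :=
  let d := PySem.Dict.ofList kv
  if d.size = 0 then "@hook"
  else
    let rank := (PySem.List.enumerate pvOrder 0).foldl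
      (fun r p => r.insert p.2 p.1) (PySem.Dict.empty : PySem.Dict String Int)
    let keys := PySem.List.sorted2 d.keys
      (fun k => rank.getD k (PySem.List.len pvOrder)) (fun k => k) false
    "@hook " ++ PySem.Str.join " " (keys.map (fun k => k ++ "=" ++ pvFormatValue (d.getD k "")))

-- ===== PRECONDITION & SPEC =====
def Spec_format_hook_comment_py (kv : List (String × String)) (out : String) : Prop := out = format_hook_comment_py_alt kv
instance (kv : List (String × String)) (out : String) : Decidable (Spec_format_hook_comment_py kv out) := by unfold Spec_format_hook_comment_py; infer_instance

-- ===== CLAIM (what is proved, stated in full; the proofs are below) =====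
def Claim_equal_format_hook_comment_py : Prop := ∀ (kv : List (String × String)), Dom_format_hook_comment_py kv → Spec_format_hook_comment_py kv (format_hook_comment_py kv)

-- ===== LEMMAS AND PROOFS =====

-- the rank dictionary B builds, as a named closed term (definitionally B's `let rank`)
def pvRankD : PySem.Dict String Int :=
  (PySem.List.enumerate pvOrder 0).foldl
    (fun r p => r.insert p.2 p.1) (PySem.Dict.empty : PySem.Dict String Int)

-- B's composite sort key, first component: rank.get(k, len(order))
def pvRk (k : String) : Int := pvRankD.getD k (PySem.List.len pvOrder)

theorem pv_rk_lt (a : String) (ha : a ∈ pvOrder) : pvRk a < 10 := by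
  fin_cases ha <;> decide

theorem pv_rk_default (a : String) (ha : pvOrder.contains a = false) : pvRk a = 10 := by
  have hk : pvRankD.keys = pvOrder := by decide
  have hc : pvRankD.contains a = false := by
    rw [← Bool.not_eq_true]
    intro h
    have := (PySem.Dict.contains_iff_mem_keys pvRankD a).1 h
    rw [hk] at this
    simp at ha
    exact ha this
  rw [pvRk, PySem.Dict.getD_of_not_contains _ _ hc]
  decide

theorem pv_order_pairwise : List.Pairwise (fun a b => pvRk a < pvRk b) pvOrder := by decide

-- Python's tuple-key sort IS the single sort under the lexicographic order on Int × String
theorem pv_sorted2_eq_sorted_lex (f : String → Int) (xs : List String) :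
    PySem.List.sorted2 xs f (fun k => k) false
      = PySem.List.sorted xs (fun k => toLex (f k, k)) false := by
  simp only [PySem.List.sorted2, PySem.List.sorted]
  congr 1
  funext acc x
  congr 1
  funext a b
  by_cases h1 : f a < f b
  · simp [h1, Prod.Lex.toLex_lt_toLex]
  · by_cases h2 : f b < f a
    · have hne : f a ≠ f b := by omega
      simp [h1, h2, hne, Prod.Lex.toLex_lt_toLex]
    · have heq : f a = f b := by omega
      simp [heq, Prod.Lex.toLex_lt_toLex, String.lt_iff_toList_lt]

-- the composite-key sort of the keys is exactly A's two passes
theorem pv_sort_split (d : PySem.Dict String String) (hnd : d.keys.Nodup) :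
    PySem.List.sorted d.keys (fun k => toLex (pvRk k, k)) false
      = pvOrder.filter (fun k => d.contains k)
        ++ (PySem.List.sorted d.keys (fun k => k) false).filter (fun k => !pvOrder.contains k) := by
  have horder : pvOrder.Nodup := by decide
  have hSperm : (PySem.List.sorted d.keys (fun k => k) false).Perm d.keys :=
    PySem.List.sorted_perm d.keys (fun k => k) false
  have hSnd : (PySem.List.sorted d.keys (fun k => k) false).Nodup := hSperm.nodup_iff.2 hnd
  apply PySem.List.sorted_eq_of_perm_of_pairwise_lt
  · -- permutation with the key list
    have h1 : (pvOrder.filter (fun k => d.contains k)).Perm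
        (d.keys.filter (fun k => pvOrder.contains k)) := by
      rw [List.perm_ext_iff_of_nodup (horder.filter _) (hnd.filter _)]
      intro a
      simp only [List.mem_filter]
      constructor
      · rintro ⟨ha, hc⟩
        exact ⟨(PySem.Dict.contains_iff_mem_keys d a).1 hc, by simpa using ha⟩
      · rintro ⟨ha, hc⟩
        exact ⟨by simpa using hc, (PySem.Dict.contains_iff_mem_keys d a).2 ha⟩
    have h2 : ((PySem.List.sorted d.keys (fun k => k) false).filter
        (fun k => !pvOrder.contains k)).Perm (d.keys.filter (fun k => !pvOrder.contains k)) :=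
      hSperm.filter _
    exact (h1.append h2).trans (List.filter_append_perm _ d.keys)
  · -- the two passes are strictly increasing in the composite key
    rw [List.pairwise_append]
    refine ⟨?_, ?_, ?_⟩
    · have := pv_order_pairwise.sublist (List.filter_sublist (p := fun k => d.contains k))
      exact this.imp (fun h => Prod.Lex.toLex_lt_toLex.2 (Or.inl h))
    · have hlt : List.Pairwise (fun a b : String => a < b)
          (PySem.List.sorted d.keys (fun k => k) false) := by
        have hle := PySem.List.sorted_pairwise d.keys (fun k => k)
        exact (List.Pairwise.and hle hSnd).imp (fun h => lt_of_le_of_ne h.1 h.2)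
      have := hlt.sublist (List.filter_sublist (p := fun k => !pvOrder.contains k))
      refine this.imp_of_mem ?_
      intro a b ha hb hab
      have hra : pvRk a = 10 := pv_rk_default a (by simpa using (List.mem_filter.1 ha).2)
      have hrb : pvRk b = 10 := pv_rk_default b (by simpa using (List.mem_filter.1 hb).2)
      exact Prod.Lex.toLex_lt_toLex.2 (Or.inr ⟨by rw [hra, hrb], hab⟩)
    · intro a ha b hb
      have hra : pvRk a < 10 := pv_rk_lt a (List.mem_filter.1 ha).1
      have hrb : pvRk b = 10 := pv_rk_default b (by simpa using (List.mem_filter.1 hb).2)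
      exact Prod.Lex.toLex_lt_toLex.2 (Or.inl (by omega))

-- B's sorted key list, written as it appears in the port, equals A's two filtered passes
theorem pv_keys_eq (d : PySem.Dict String String) (hnd : d.keys.Nodup) :
    PySem.List.sorted2 d.keys
        (fun k => ((PySem.List.enumerate pvOrder 0).foldl
          (fun r p => r.insert p.2 p.1) (PySem.Dict.empty : PySem.Dict String Int)).getD k
          (PySem.List.len pvOrder)) (fun k => k) false
      = pvOrder.filter (fun k => d.contains k)
        ++ (PySem.List.sorted d.keys (fun k => k) false).filter (fun k => !pvOrder.contains k) := by
  show PySem.List.sorted2 d.keys pvRk (fun k => k) false = _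
  rw [pv_sorted2_eq_sorted_lex pvRk d.keys, pv_sort_split d hnd]

-- ===== VERDICT (by name: the statement is the Claim_ definition above) =====
theorem format_hook_comment_py_spec : Claim_equal_format_hook_comment_py := by
  intro kv _
  unfold Spec_format_hook_comment_py format_hook_comment_py format_hook_comment_py_alt
  by_cases h : (PySem.Dict.ofList kv).size = 0
  · simp only [h, if_pos]
  · simp only [h, if_false]
    rw [PySem.List.foldl_append_if, PySem.List.foldl_append_if,
      pv_keys_eq (PySem.Dict.ofList kv) (PySem.Dict.nodup_keys_ofList kv)]
    simp [List.map_append]
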